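-- pv_equiv track=rewrite | github.com/Datejl/Jane-Clanker-Public--Jadee- | features/staff/sessions/favoriteGamesView.py | _joinFavoriteGameLines
-- ===== SOURCE A (Python) =====
-- def _joinFavoriteGameLines(lines: list[str]) -> str:
--     if not lines:
--         return "No favorited games available."
--     safeLines: list[str] = []
--     totalLen = 0
--     limit = 1020
--     for line in lines:
--         compactLine = line if len(line) <= 200 else f"{line[:197]}..."
--         projected = totalLen + len(compactLine) + (1 if safeLines else 0)
--         if projected > limit:
--             break
--         safeLines.append(compactLine)
--         totalLen = projected
--     if len(safeLines) < len(lines):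
--         safeLines.append("...")
--     return "\n".join(safeLines)
-- ===== SOURCE B (Python) =====
-- def _joinFavoriteGameLines(lines: list[str]) -> str:
--     if not lines:
--         return "No favorited games available."
--     compact = [line if len(line) <= 200 else line[:197] + "..." for line in lines]
--     # cumulative table: cum[k] - 1 == joined length of the first k compact lines (cum[0] == 0)
--     cum = [0]
--     for c in compact:
--         cum.append(cum[-1] + len(c) + 1)
--     # cutoff: largest k whose joined length fits in 1020 (k == 0 always qualifies)
--     count = next(k for k, c in reversed(list(enumerate(cum))) if k == 0 or c - 1 <= 1020)
--     chosen = compact[:count]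
--     if count < len(lines):
--         chosen.append("...")
--     return "\n".join(chosen)
-- ===== Notes on version B (the rewrite author's own statement) =====
-- stated objective: alternative
-- what changed: Replaces A's stateful greedy loop (running total, conditional separator, break) by a precomputed cumulative-length table over the compacted lines and a cutoff search for the largest prefix count whose joined length fits, then joins that prefix.
import Mathlib
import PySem

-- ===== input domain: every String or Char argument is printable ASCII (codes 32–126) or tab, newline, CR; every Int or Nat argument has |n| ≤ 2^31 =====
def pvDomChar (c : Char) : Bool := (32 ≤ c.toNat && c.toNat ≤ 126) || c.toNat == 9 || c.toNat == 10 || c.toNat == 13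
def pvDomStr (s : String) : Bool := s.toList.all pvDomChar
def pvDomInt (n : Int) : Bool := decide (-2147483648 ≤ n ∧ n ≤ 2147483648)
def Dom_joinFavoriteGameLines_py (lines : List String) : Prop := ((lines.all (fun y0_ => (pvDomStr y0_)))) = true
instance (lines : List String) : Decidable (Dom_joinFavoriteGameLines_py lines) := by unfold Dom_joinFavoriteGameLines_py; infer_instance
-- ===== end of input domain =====

-- B replaces A's stateful greedy loop by a cumulative-length table over the compacted
-- lines plus a cutoff search for the largest fitting prefix; same cost, proved equal.


-- ===== PORT A =====
-- `line if len(line) <= 200 else f"{line[:197]}..."` — identical expression in both sources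
def pvCompact (line : String) : String :=
  if PySem.Str.len line ≤ 200 then line else PySem.Str.slice line none (some 197) ++ "..."

-- A's for-loop with break: state = (safeLines, totalLen)
def pvALoop : List String → List String → Int → List String
  | [], safeLines, _ => safeLines
  | line :: rest, safeLines, totalLen =>
    let compactLine := pvCompact line
    let projected := totalLen + PySem.Str.len compactLine + (if safeLines.isEmpty then 0 else 1)
    if projected > 1020 then safeLines
    else pvALoop rest (safeLines ++ [compactLine]) projected

def joinFavoriteGameLines_py (lines : List String) : String :=
  if lines = [] then "No favorited games available."
  else
    let safeLines := pvALoop lines [] 0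
    let safeLines := if safeLines.length < lines.length then safeLines ++ ["..."] else safeLines
    PySem.Str.join "\n" safeLines

-- ===== PORT B =====
def joinFavoriteGameLines_py_alt (lines : List String) : String :=
  if lines = [] then "No favorited games available."
  else
    let compact := lines.map pvCompact
    -- cum[-1] via pyGetD: cum is never empty, so the index is always in range
    let cum := compact.foldl
      (fun acc c => acc ++ [PySem.List.pyGetD acc (-1) 0 + PySem.Str.len c + 1]) [(0 : Int)]
    -- next(...) always finds k = 0, so the getD default is never used
    let count := (((PySem.List.enumerate cum 0).reverse.find?
        (fun kc => kc.1 == 0 || decide (kc.2 - 1 ≤ 1020))).map (·.1)).getD 0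
    let chosen := PySem.List.slice compact none (some count)
    let chosen := if count < PySem.List.len lines then chosen ++ ["..."] else chosen
    PySem.Str.join "\n" chosen

-- ===== PRECONDITION & SPEC =====
def Spec_joinFavoriteGameLines_py (lines : List String) (out : String) : Prop := out = joinFavoriteGameLines_py_alt lines
instance (lines : List String) (out : String) : Decidable (Spec_joinFavoriteGameLines_py lines out) := by unfold Spec_joinFavoriteGameLines_py; infer_instance

-- ===== CLAIM (what is proved, stated in full; the proofs are below) =====
def Claim_equal_joinFavoriteGameLines_py : Prop := ∀ (lines : List String), Dom_joinFavoriteGameLines_py lines → Spec_joinFavoriteGameLines_py lines (joinFavoriteGameLines_py lines)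

-- ===== LEMMAS AND PROOFS =====

-- cumulative joined-lengths-plus-one of the compacted lines, from base a
def pvCum : Int → List String → List Int
  | _, [] => []
  | a, c :: cs =>
    (a + PySem.Str.len (pvCompact c) + 1) :: pvCum (a + PySem.Str.len (pvCompact c) + 1) cs

-- number of lines A's greedy loop keeps, phrased over the cumulative values
def pvGC : Int → List String → Nat
  | _, [] => 0
  | a, c :: cs =>
    if a + PySem.Str.len (pvCompact c) + 1 > 1021 then 0
    else pvGC (a + PySem.Str.len (pvCompact c) + 1) cs + 1

theorem pvLen_nonneg (s : String) : 0 ≤ PySem.Str.len s := by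
  rw [PySem.Str.len_eq]; exact Int.natCast_nonneg _

theorem pvGC_le (a : Int) (cs : List String) : pvGC a cs ≤ cs.length := by
  induction cs generalizing a with
  | nil => simp [pvGC]
  | cons c cs ih =>
    simp only [pvGC, List.length_cons]
    split
    · omega
    · have := ih (a + PySem.Str.len (pvCompact c) + 1); omega

theorem pvCum_lb (a : Int) (cs : List String) : ∀ x ∈ pvCum a cs, a + 1 ≤ x := by
  induction cs generalizing a with
  | nil => simp [pvCum]
  | cons c cs ih =>
    have hl := pvLen_nonneg (pvCompact c)
    simp only [pvCum, List.mem_cons]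
    rintro x (rfl | hx)
    · omega
    · have := ih (a + PySem.Str.len (pvCompact c) + 1) x hx; omega

theorem pvCum_take (a : Int) (cs : List String) :
    ∀ x ∈ (pvCum a cs).take (pvGC a cs), x ≤ 1021 := by
  induction cs generalizing a with
  | nil => simp [pvCum, pvGC]
  | cons c cs ih =>
    simp only [pvCum, pvGC]
    split
    · simp
    · rename_i h
      rw [List.take_succ_cons]
      simp only [List.mem_cons]
      rintro x (rfl | hx)
      · omega
      · exact ih (a + PySem.Str.len (pvCompact c) + 1) x hx

theorem pvCum_drop (a : Int) (cs : List String) :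
    ∀ x ∈ (pvCum a cs).drop (pvGC a cs), 1021 < x := by
  induction cs generalizing a with
  | nil => simp [pvCum, pvGC]
  | cons c cs ih =>
    simp only [pvCum, pvGC]
    split
    · rename_i h
      rw [List.drop_zero]
      simp only [List.mem_cons]
      rintro x (rfl | hx)
      · omega
      · have := pvCum_lb (a + PySem.Str.len (pvCompact c) + 1) cs x hx; omega
    · rw [List.drop_succ_cons]
      exact ih (a + PySem.Str.len (pvCompact c) + 1)

-- A's loop keeps exactly the first pvGC lines
theorem pvALoop_go (cs : List String) : ∀ (safe : List String) (a : Int), safe ≠ [] →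
    pvALoop cs safe (a - 1) = safe ++ (cs.map pvCompact).take (pvGC a cs) := by
  induction cs with
  | nil => intro safe a _; simp [pvALoop, pvGC]
  | cons c cs ih =>
    intro safe a hsafe
    have hne : safe.isEmpty = false := by simpa [List.isEmpty_iff] using hsafe
    simp only [pvALoop, pvGC, List.map_cons, hne, Bool.false_eq_true, if_false]
    by_cases h : a + PySem.Str.len (pvCompact c) + 1 > 1021
    · rw [if_pos (by omega), if_pos (by omega)]
      simp
    · rw [if_neg (by omega), if_neg (by omega)]
      have harg : a - 1 + PySem.Str.len (pvCompact c) + 1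
          = (a + PySem.Str.len (pvCompact c) + 1) - 1 := by ring
      rw [harg, ih (safe ++ [pvCompact c]) _ (by simp)]
      simp [List.take_succ_cons]

theorem pvALoop_eq (lines : List String) :
    pvALoop lines [] 0 = (lines.map pvCompact).take (pvGC 0 lines) := by
  cases lines with
  | nil => rfl
  | cons c cs =>
    simp only [pvALoop, pvGC, List.map_cons, List.isEmpty_nil, if_true]
    by_cases h : 0 + PySem.Str.len (pvCompact c) + 1 > 1021
    · rw [if_pos (by omega), if_pos (by omega)]
      simp
    · rw [if_neg (by omega), if_neg (by omega)]
      simp only [List.nil_append]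
      have harg : 0 + PySem.Str.len (pvCompact c) + 0
          = (0 + PySem.Str.len (pvCompact c) + 1) - 1 := by ring
      rw [harg, pvALoop_go cs [pvCompact c] _ (by simp)]
      simp [List.take_succ_cons]

-- B's cum-building foldl produces pvCum
theorem pvCum_length (a : Int) (cs : List String) : (pvCum a cs).length = cs.length := by
  induction cs generalizing a with
  | nil => rfl
  | cons c cs ih => simp [pvCum, ih]

theorem pvCumLoop_eq (cs : List String) : ∀ (pre : List Int) (a : Int),
    (cs.map pvCompact).foldl
        (fun acc c => acc ++ [PySem.List.pyGetD acc (-1) 0 + PySem.Str.len c + 1]) (pre ++ [a])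
      = pre ++ [a] ++ pvCum a cs := by
  induction cs with
  | nil => intro pre a; simp [pvCum]
  | cons c cs ih =>
    intro pre a
    simp only [List.map_cons, List.foldl_cons, PySem.List.pyGetD_neg_one_append_singleton, pvCum]
    rw [show pre ++ [a] ++ [a + PySem.Str.len (pvCompact c) + 1]
        = (pre ++ [a]) ++ [a + PySem.Str.len (pvCompact c) + 1] from by simp,
      ih (pre ++ [a]) _]
    simp

-- B's reversed-enumerate search finds the last index within the budget
theorem pvFind_go (t : List Int) : ∀ (m : Nat) (s : Int), 1 ≤ s → m ≤ t.length →
    (∀ x ∈ t.take m, x ≤ 1021) → (∀ x ∈ t.drop m, 1021 < x) →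
    (((PySem.List.enumerate t s).reverse.find?
        (fun kc => kc.1 == 0 || decide (kc.2 - 1 ≤ 1020))).map (·.1))
      = if m = 0 then none else some (s + m - 1) := by
  induction t with
  | nil =>
    intro m s _ hm _ _
    simp [PySem.List.enumerate_nil, Nat.le_zero.mp hm]
  | cons x ts ih =>
    intro m s hs hm htake hdrop
    rw [PySem.List.enumerate_cons, List.reverse_cons, List.find?_append]
    cases m with
    | zero =>
      have hx : (1021:Int) < x := hdrop x (by simp)
      have hnone : ((PySem.List.enumerate ts (s+1)).reverse.find?
          (fun kc => kc.1 == 0 || decide (kc.2 - 1 ≤ 1020))) = none := by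
        rw [List.find?_eq_none]
        intro kc hkc
        rw [List.mem_reverse, PySem.List.mem_enumerate_iff] at hkc
        obtain ⟨k, hk, rfl⟩ := hkc
        have h2 : 1021 < ts[k] := hdrop ts[k] (by simp)
        simp only [Bool.or_eq_true, beq_iff_eq, decide_eq_true_eq, not_or]
        constructor <;> omega
      have hc : (s == (0:Int) || decide (x ≤ 1021)) = false := by
        simp only [Bool.or_eq_false_iff, beq_eq_false_iff_ne, decide_eq_false_iff_not]
        exact ⟨by omega, by omega⟩
      rw [hnone]
      simp [List.find?, hc]
    | succ m' =>
      have hxle : x ≤ 1021 := htake x (by simp [List.take_succ_cons])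
      have ihh := ih m' (s+1) (by omega) (by simpa using hm)
        (fun y hy => htake y (by simp [List.take_succ_cons, hy]))
        (fun y hy => hdrop y (by simp [List.drop_succ_cons, hy]))
      rcases hfind : ((PySem.List.enumerate ts (s+1)).reverse.find?
          (fun kc => kc.1 == 0 || decide (kc.2 - 1 ≤ 1020))) with _ | kc
      · rw [hfind] at ihh
        simp only [Option.map_none] at ihh
        have hm0 : m' = 0 := by
          by_contra hne
          rw [if_neg hne] at ihh
          simp at ihh
        subst hm0
        rw [hfind]
        simp [List.find?, hxle]
      · rw [hfind] at ihh
        simp only [Option.map_some] at ihh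
        have hne : m' ≠ 0 := by
          by_contra h0
          rw [if_pos h0] at ihh
          simp at ihh
        rw [if_neg hne] at ihh
        have hkc1 : kc.1 = s + 1 + m' - 1 := Option.some.inj ihh
        rw [hfind]
        simp only [Option.some_or, Option.map_some, if_neg (Nat.succ_ne_zero m')]
        congr 1
        rw [hkc1]
        push_cast
        ring

theorem pvCount_eq (cs : List String) :
    ((((PySem.List.enumerate ((0 : Int) :: pvCum 0 cs) 0).reverse.find?
        (fun kc => kc.1 == 0 || decide (kc.2 - 1 ≤ 1020))).map (·.1)).getD 0)
      = (pvGC 0 cs : Int) := by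
  have hm : pvGC 0 cs ≤ (pvCum 0 cs).length := by
    rw [pvCum_length]; exact pvGC_le 0 cs
  have hfg := pvFind_go (pvCum 0 cs) (pvGC 0 cs) 1 le_rfl hm (pvCum_take 0 cs) (pvCum_drop 0 cs)
  rw [PySem.List.enumerate_cons, show (0:Int) + 1 = 1 from rfl, List.reverse_cons, List.find?_append]
  rcases hf : ((PySem.List.enumerate (pvCum 0 cs) 1).reverse.find?
      (fun kc => kc.1 == 0 || decide (kc.2 - 1 ≤ 1020))) with _ | kc
  · rw [hf] at hfg
    simp only [Option.map_none] at hfg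
    have h0 : pvGC 0 cs = 0 := by
      by_contra hne
      rw [if_neg hne] at hfg
      simp at hfg
    rw [hf]
    simp [List.find?, h0]
  · rw [hf] at hfg
    simp only [Option.map_some] at hfg
    have hne : pvGC 0 cs ≠ 0 := by
      by_contra h0
      rw [if_pos h0] at hfg
      simp at hfg
    rw [if_neg hne] at hfg
    have hkc1 : kc.1 = 1 + (pvGC 0 cs : Int) - 1 := Option.some.inj hfg
    rw [hf]
    simp only [Option.some_or, Option.map_some, Option.getD_some]
    omega

-- ===== VERDICT (by name: the statement is the Claim_ definition above) =====
theorem joinFavoriteGameLines_py_spec : Claim_equal_joinFavoriteGameLines_py := by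
  intro lines _
  unfold Spec_joinFavoriteGameLines_py joinFavoriteGameLines_py joinFavoriteGameLines_py_alt
  by_cases h : lines = []
  · simp [h]
  · rw [if_neg h, if_neg h]
    have hcum : (lines.map pvCompact).foldl
        (fun acc c => acc ++ [PySem.List.pyGetD acc (-1) 0 + PySem.Str.len c + 1]) [(0 : Int)]
        = (0 : Int) :: pvCum 0 lines := by
      have h2 := pvCumLoop_eq lines [] 0
      simpa using h2
    simp only [hcum, pvCount_eq, pvALoop_eq, PySem.List.slice_to_natCast]
    have hmn : pvGC 0 lines ≤ lines.length := pvGC_le 0 lines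
    have hlen : (List.take (pvGC 0 lines) (lines.map pvCompact)).length = pvGC 0 lines := by
      rw [List.length_take, List.length_map]; omega
    rw [hlen, PySem.List.len_eq]
    by_cases hlt : pvGC 0 lines < lines.length
    · rw [if_pos hlt, if_pos (by exact_mod_cast hlt)]
    · rw [if_neg hlt, if_neg (by exact_mod_cast hlt)]
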